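-- pv_equiv track=rewrite | github.com/contact-edwayne/Chloe | brain.py | _insert_under_section
-- ===== SOURCE A (Python) =====
-- def _insert_under_section(text: str, header: str, line: str) -> str:
--     lines = text.splitlines()
--     out = []
--     i = 0
--     inserted = False
--     while i < len(lines):
--         out.append(lines[i])
--         if lines[i].strip() == header and not inserted:
--             j = i + 1
--             while j < len(lines) and lines[j].strip() == '':
--                 out.append(lines[j])
--                 j += 1
--             if j < len(lines) and lines[j].strip().startswith('(none'):
--                 out.append(line)
--                 inserted = True
--                 i = j + 1
--                 continue
--             out.append(line)
--             inserted = True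
--             i = j
--             continue
--         i += 1
--     return '\n'.join(out) + ('\n' if not text.endswith('\n') else '')
-- ===== SOURCE B (Python) =====
-- def _insert_under_section(text: str, header: str, line: str) -> str:
--     lines = text.splitlines()
--     i = next((k for k, l in enumerate(lines) if l.strip() == header), None)
--     if i is None:
--         body = lines
--     else:
--         j = i + 1
--         while j < len(lines) and lines[j].strip() == '':
--             j += 1
--         if j < len(lines) and lines[j].strip().startswith('(none'):
--             rest = lines[j + 1:]
--         else:
--             rest = lines[j:]
--         body = lines[:i + 1] + lines[i + 1:j] + [line] + rest
--     return '\n'.join(body) + ('' if text.endswith('\n') else '\n')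
-- ===== Notes on version B (the rewrite author's own statement) =====
-- stated objective: simpler
-- what changed: A walks an index through the lines with a flag and manual continue-jumps while appending every line to an accumulator; B finds the first header index, skips the blank run, and builds the result by slice concatenation lines[:i+1] + blanks + [line] + rest with no accumulator or flag.
import Mathlib
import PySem

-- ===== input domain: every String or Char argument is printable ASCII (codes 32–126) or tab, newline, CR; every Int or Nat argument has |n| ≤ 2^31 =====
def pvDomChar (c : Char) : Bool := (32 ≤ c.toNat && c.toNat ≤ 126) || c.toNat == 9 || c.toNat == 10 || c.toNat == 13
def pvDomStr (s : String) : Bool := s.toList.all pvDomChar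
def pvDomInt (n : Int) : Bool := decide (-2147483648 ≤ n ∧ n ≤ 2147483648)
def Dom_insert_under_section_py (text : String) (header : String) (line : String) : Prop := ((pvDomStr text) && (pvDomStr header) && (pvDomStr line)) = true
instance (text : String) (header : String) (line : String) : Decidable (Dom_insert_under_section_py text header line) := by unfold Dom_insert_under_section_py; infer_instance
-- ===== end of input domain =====

-- B replaces A's index-walking accumulator loop (insertion flag + manual continue-jumps) by
-- find-the-header then slice concatenation; objective: simpler, same O(n) cost.

-- ===== PORT A =====
-- A's inner `while j < len(lines) and lines[j].strip() == '':` loop: returns (the blank lines it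
-- appended to `out`, the final j).  `lines.getD j ""` renders the short-circuit `and`: it is only
-- read under the `j < len(lines)` conjunct, where it equals lines[j].
def pvScanBlanks (lines : List String) (j : Nat) : List String × Nat :=
  if h : j < lines.length ∧ PySem.Str.strip (lines.getD j "") = "" then
    let r := pvScanBlanks lines (j + 1)
    (lines.getD j "" :: r.1, r.2)
  else ([], j)
termination_by lines.length - j
decreasing_by omega

-- cited by pvLoopA's decreasing_by: A's `i = j` / `i = j + 1` jumps only move forward
theorem pvScanBlanks_le (lines : List String) (j : Nat) : j ≤ (pvScanBlanks lines j).2 := by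
  fun_induction pvScanBlanks lines j with
  | case1 j h r ih =>
    have hr : r.2 = (pvScanBlanks lines (j + 1)).2 := rfl
    simp only [hr] at *
    omega
  | case2 j h => simp

-- A's outer `while i < len(lines):` loop with its accumulator `out` and flag `inserted`;
-- the three recursive calls are the `continue` at i = j + 1, the `continue` at i = j, and i += 1
def pvLoopA (lines : List String) (header line : String) (i : Nat) (out : List String) (inserted : Bool) : List String :=
  if h : i < lines.length then
    if PySem.Str.strip lines[i] = header ∧ inserted = false then
      if (pvScanBlanks lines (i + 1)).2 < lines.length ∧
          PySem.Str.startswith (PySem.Str.strip (lines.getD (pvScanBlanks lines (i + 1)).2 "")) "(none" = true then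
        pvLoopA lines header line ((pvScanBlanks lines (i + 1)).2 + 1)
          (out ++ [lines[i]] ++ (pvScanBlanks lines (i + 1)).1 ++ [line]) true
      else
        pvLoopA lines header line (pvScanBlanks lines (i + 1)).2
          (out ++ [lines[i]] ++ (pvScanBlanks lines (i + 1)).1 ++ [line]) true
    else
      pvLoopA lines header line (i + 1) (out ++ [lines[i]]) inserted
  else out
termination_by lines.length - i
decreasing_by
  · have := pvScanBlanks_le lines (i + 1); omega
  · have := pvScanBlanks_le lines (i + 1); omega
  · omega

def insert_under_section_py (text : String) (header : String) (line : String) : String :=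
  let lines := PySem.Str.splitlines text
  PySem.Str.join "\n" (pvLoopA lines header line 0 [] false)
    ++ (if PySem.Str.endswith text "\n" = true then "" else "\n")

-- ===== PORT B =====
-- `next((k for k, l in enumerate(lines) if l.strip() == header), None)`: first matching index
def pvFindHdr (lines : List String) (header : String) (k : Nat) : Option Nat :=
  if h : k < lines.length then
    if PySem.Str.strip lines[k] = header then some k else pvFindHdr lines header (k + 1)
  else none
termination_by lines.length - k
decreasing_by omega

-- B's `while j < len(lines) and lines[j].strip() == '': j += 1` (getD as in pvScanBlanks)
def pvSkipBlanks (lines : List String) (j : Nat) : Nat :=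
  if h : j < lines.length ∧ PySem.Str.strip (lines.getD j "") = "" then pvSkipBlanks lines (j + 1)
  else j
termination_by lines.length - j
decreasing_by omega

-- Source B's slices have 0 ≤ a ≤ b ≤ len (or run to the end): lines[:i+1] = take (i+1),
-- lines[i+1:j] = (drop (i+1)).take (j-(i+1)), lines[j:] = drop j, lines[j+1:] = drop (j+1) — exact here
def insert_under_section_py_alt (text : String) (header : String) (line : String) : String :=
  let lines := PySem.Str.splitlines text
  let body :=
    match pvFindHdr lines header 0 with
    | none => lines
    | some i =>
      let j := pvSkipBlanks lines (i + 1)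
      let rest :=
        if j < lines.length ∧ PySem.Str.startswith (PySem.Str.strip (lines.getD j "")) "(none" = true then
          lines.drop (j + 1)
        else lines.drop j
      lines.take (i + 1) ++ (lines.drop (i + 1)).take (j - (i + 1)) ++ [line] ++ rest
  PySem.Str.join "\n" body ++ (if PySem.Str.endswith text "\n" = true then "" else "\n")

-- ===== PRECONDITION & SPEC =====
def Spec_insert_under_section_py (text : String) (header : String) (line : String) (out : String) : Prop := out = insert_under_section_py_alt text header line
instance (text : String) (header : String) (line : String) (out : String) : Decidable (Spec_insert_under_section_py text header line out) := by unfold Spec_insert_under_section_py; infer_instance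

-- ===== CLAIM (what is proved, stated in full; the proofs are below) =====
def Claim_equal_insert_under_section_py : Prop := ∀ (text : String) (header : String) (line : String), Dom_insert_under_section_py text header line → Spec_insert_under_section_py text header line (insert_under_section_py text header line)

-- ===== LEMMAS AND PROOFS =====

theorem pvTake_drop_cons (lines : List String) (i n : Nat) (hi : i < lines.length) (hn : 0 < n) :
    (lines.drop i).take n = lines[i] :: (lines.drop (i + 1)).take (n - 1) := by
  obtain ⟨m, rfl⟩ : ∃ m, n = m + 1 := ⟨n - 1, by omega⟩
  rw [List.drop_eq_getElem_cons hi, List.take_succ_cons]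
  simp

-- A's blank scan appends exactly B's slice lines[j:skip j] and stops at B's skip index
theorem pvScanBlanks_eq (lines : List String) (j : Nat) :
    pvScanBlanks lines j = ((lines.drop j).take (pvSkipBlanks lines j - j), pvSkipBlanks lines j) := by
  fun_induction pvScanBlanks lines j with
  | case1 j h r ih =>
    have hle := pvScanBlanks_le lines (j + 1)
    have hr : r = pvScanBlanks lines (j + 1) := rfl
    rw [ih] at hle
    rw [hr, ih]
    simp only at hle ⊢
    rw [show pvSkipBlanks lines j = pvSkipBlanks lines (j + 1) by rw [pvSkipBlanks, dif_pos h]]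
    rw [pvTake_drop_cons lines j _ h.1 (by omega)]
    rw [show pvSkipBlanks lines (j + 1) - j - 1 = pvSkipBlanks lines (j + 1) - (j + 1) by omega]
    simp [List.getElem?_eq_getElem h.1]
  | case2 j h =>
    rw [show pvSkipBlanks lines j = j by rw [pvSkipBlanks, dif_neg h]]
    simp

theorem pvFindHdr_ge (lines : List String) (header : String) (k : Nat) (r : Nat)
    (h : pvFindHdr lines header k = some r) : k ≤ r := by
  fun_induction pvFindHdr lines header k with
  | case1 k hk hm => simp_all
  | case2 k hk hm ih => have := ih h; omega
  | case3 k hk => simp_all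

-- B's body read from position i on (proof-only generalisation of B's `body`)
def pvAltFrom (lines : List String) (header line : String) (i : Nat) : List String :=
  match pvFindHdr lines header i with
  | none => lines.drop i
  | some k =>
    (lines.drop i).take (k + 1 - i) ++
      (lines.drop (k + 1)).take (pvSkipBlanks lines (k + 1) - (k + 1)) ++ [line] ++
      (if pvSkipBlanks lines (k + 1) < lines.length ∧
          PySem.Str.startswith (PySem.Str.strip (lines.getD (pvSkipBlanks lines (k + 1)) "")) "(none" = true then
        lines.drop (pvSkipBlanks lines (k + 1) + 1)
      else lines.drop (pvSkipBlanks lines (k + 1)))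

-- once `inserted` is set, A just copies the remaining lines
theorem pvLoopA_inserted (lines : List String) (header line : String) (i : Nat) (out : List String) :
    pvLoopA lines header line i out true = out ++ lines.drop i := by
  rw [pvLoopA]
  split
  · rename_i h
    rw [if_neg (by simp)]
    rw [pvLoopA_inserted lines header line (i + 1)]
    rw [List.drop_eq_getElem_cons h]
    simp
  · rename_i h
    rw [List.drop_eq_nil_of_le (by omega)]
    simp
termination_by lines.length - i
decreasing_by omega

-- main invariant: A's loop from i with an empty flag produces B's body read from i
theorem pvLoopA_eq_altFrom (lines : List String) (header line : String) (i : Nat) (out : List String) :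
    pvLoopA lines header line i out false = out ++ pvAltFrom lines header line i := by
  rw [pvLoopA]
  split
  · rename_i h
    by_cases hm : PySem.Str.strip lines[i] = header
    · rw [if_pos ⟨hm, rfl⟩]
      have hle := pvScanBlanks_le lines (i + 1)
      rw [pvScanBlanks_eq] at hle
      have hfi : pvFindHdr lines header i = some i := by rw [pvFindHdr, dif_pos h, if_pos hm]
      unfold pvAltFrom
      rw [hfi]
      simp only [pvScanBlanks_eq]
      rw [pvTake_drop_cons lines i (i + 1 - i) h (by omega)]
      split
      · rw [pvLoopA_inserted]
        simp
      · rw [pvLoopA_inserted]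
        simp
    · rw [if_neg (by simp [hm])]
      rw [pvLoopA_eq_altFrom lines header line (i + 1)]
      have hfi : pvFindHdr lines header i = pvFindHdr lines header (i + 1) := by
        rw [pvFindHdr, dif_pos h, if_neg hm]
      unfold pvAltFrom
      rw [hfi]
      cases hf : pvFindHdr lines header (i + 1) with
      | none =>
        rw [List.drop_eq_getElem_cons h]
        simp
      | some k =>
        have hk : i + 1 ≤ k := pvFindHdr_ge lines header (i + 1) k hf
        simp only
        rw [pvTake_drop_cons lines i (k + 1 - i) h (by omega)]
        rw [show k + 1 - i - 1 = k + 1 - (i + 1) by omega]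
        simp
  · rename_i h
    rw [show pvAltFrom lines header line i = lines.drop i by
      unfold pvAltFrom; rw [pvFindHdr, dif_neg h]]
    rw [List.drop_eq_nil_of_le (by omega)]
    simp
termination_by lines.length - i
decreasing_by omega

-- ===== VERDICT (by name: the statement is the Claim_ definition above) =====
theorem insert_under_section_py_spec : Claim_equal_insert_under_section_py := by
  intro text header line _
  unfold Spec_insert_under_section_py insert_under_section_py insert_under_section_py_alt
  simp only
  congr 2
  rw [pvLoopA_eq_altFrom]
  unfold pvAltFrom
  cases hf : pvFindHdr (PySem.Str.splitlines text) header 0 with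
  | none => simp
  | some k => simp
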